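-- pv_equiv track=rewrite | github.com/imReese/leetcode-solutions | utils/generate_problem_readme.py | find_relevant_code
-- ===== SOURCE A (Python) =====
-- def find_relevant_code(snippets: list, target_lang: str = None) -> str:
--     """寻找最匹配的代码片段"""
--     lang_priority = ["cpp", "python3", "java"]  # 默认优先级
--     if target_lang:
--         lang_priority.insert(0, target_lang.lower())
--
--     for lang in lang_priority:
--         for snippet in snippets:
--             if snippet["langSlug"] == lang:
--                 return snippet["code"]
--     return ""
-- ===== SOURCE B (Python) =====
-- def find_relevant_code(snippets: list, target_lang: str = None) -> str:
--     """寻找最匹配的代码片段"""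
--     lang_priority = ["cpp", "python3", "java"]
--     if target_lang:
--         lang_priority.insert(0, target_lang.lower())
--
--     # single pass over snippets: keep the leftmost snippet with the best
--     # (smallest) priority rank seen so far; rank 0 cannot be beaten, so stop there
--     sentinel = len(lang_priority)
--     best, best_rank = None, sentinel
--     for s in snippets:
--         slug = s["langSlug"]
--         r = lang_priority.index(slug) if slug in lang_priority else sentinel
--         if r < best_rank:
--             best, best_rank = s, r
--             if best_rank == 0:
--                 break
--     return best["code"] if best is not None else ""
-- ===== Notes on version B (the rewrite author's own statement) =====
-- stated objective: alternative
-- what changed: B makes a single left-to-right pass over snippets keeping the leftmost snippet of minimal priority rank (an argmin with a rank sentinel), instead of A's rescan of the whole snippet list once per priority language.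
import Mathlib
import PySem

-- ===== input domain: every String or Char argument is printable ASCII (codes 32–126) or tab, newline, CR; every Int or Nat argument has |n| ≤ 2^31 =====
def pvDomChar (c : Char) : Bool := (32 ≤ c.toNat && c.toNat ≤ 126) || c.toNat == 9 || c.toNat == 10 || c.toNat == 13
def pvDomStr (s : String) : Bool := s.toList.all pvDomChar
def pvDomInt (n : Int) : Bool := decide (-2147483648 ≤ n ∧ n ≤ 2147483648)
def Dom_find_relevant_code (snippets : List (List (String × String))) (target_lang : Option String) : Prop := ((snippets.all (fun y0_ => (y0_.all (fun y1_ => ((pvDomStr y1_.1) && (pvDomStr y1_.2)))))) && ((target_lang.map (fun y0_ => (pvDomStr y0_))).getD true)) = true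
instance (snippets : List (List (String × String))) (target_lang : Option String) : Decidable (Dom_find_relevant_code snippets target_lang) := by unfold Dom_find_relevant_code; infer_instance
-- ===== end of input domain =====

-- B replaces A's per-priority-language rescans of the snippet list by ONE left-to-right pass
-- keeping the leftmost snippet of minimal priority rank (objective: alternative algorithm).

-- shared helpers: Python dict access snippet[k] (first match in the association list; Pre_ rules
-- out the KeyError cases, so the ports totalize the lookup with a default)
def pvSnipGetD (s : List (String × String)) (k dflt : String) : String :=
  ((s.find? (fun p => p.1 == k)).map (·.2)).getD dflt

-- lang_priority = ["cpp","python3","java"]; if target_lang: insert(0, target_lang.lower())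
def pvPriority (target_lang : Option String) : List String :=
  match target_lang with
  | none => ["cpp", "python3", "java"]
  | some t => if t = "" then ["cpp", "python3", "java"]
              else PySem.List.insert ["cpp", "python3", "java"] 0 (PySem.Str.lower t)

-- ===== PORT A =====
-- inner loop: first snippet whose langSlug equals lang, returning its code
def pvScanA (snippets : List (List (String × String))) (lang : String) : Option String :=
  match snippets with
  | [] => none
  | s :: rest =>
      if pvSnipGetD s "langSlug" "" == lang then some (pvSnipGetD s "code" "")
      else pvScanA rest lang

-- outer loop over lang_priority
def pvLoopA (priority : List String) (snippets : List (List (String × String))) : String :=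
  match priority with
  | [] => ""
  | lang :: rest =>
      match pvScanA snippets lang with
      | some code => code
      | none => pvLoopA rest snippets

def find_relevant_code (snippets : List (List (String × String))) (target_lang : Option String) : String :=
  pvLoopA (pvPriority target_lang) snippets

-- ===== PORT B =====
-- slug = s["langSlug"]; r = lang_priority.index(slug) if slug in lang_priority else sentinel
-- (the lookup s["langSlug"] is totalized with default ""; Pre_ rules out the KeyError case,
-- and "" never occurs in lang_priority)
def pvRankB (priority : List String) (s : List (String × String)) : Nat :=
  if priority.contains (pvSnipGetD s "langSlug" "") then
    (PySem.List.index? priority (pvSnipGetD s "langSlug" "")).getD priority.length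
  else priority.length

-- for s in snippets: if r < best_rank: best, best_rank = s, r; if best_rank == 0: break
def pvLoopB (priority : List String) (snippets : List (List (String × String)))
    (best : Option (List (String × String))) (best_rank : Nat) :
    Option (List (String × String)) × Nat :=
  match snippets with
  | [] => (best, best_rank)
  | s :: rest =>
      let r := pvRankB priority s
      if r < best_rank then
        if r = 0 then (some s, r) else pvLoopB priority rest (some s) r
      else pvLoopB priority rest best best_rank

def find_relevant_code_alt (snippets : List (List (String × String))) (target_lang : Option String) : String :=
  let priority := pvPriority target_lang
  match (pvLoopB priority snippets none priority.length).1 with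
  | some s => pvSnipGetD s "code" ""
  | none => ""

-- ===== PRECONDITION & SPEC =====
-- Pre_ excludes exactly the inputs on which the Python A raises KeyError: either A's scan for the
-- top-priority language reaches a snippet without a "langSlug" key before any match of that
-- language, or the snippet A would return (first snippet of the first priority language that
-- occurs) has no "code" key.
def Pre_find_relevant_code (snippets : List (List (String × String))) (target_lang : Option String) : Prop :=
  (((match snippets.find?
        (fun s => !(s.find? (fun p => p.1 == "langSlug")).isSome
                  || pvSnipGetD s "langSlug" "" == (pvPriority target_lang).headD "") with
    | none => true
    | some s => (s.find? (fun p => p.1 == "langSlug")).isSome) &&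
   (match (pvPriority target_lang).find?
        (fun lang => (snippets.find? (fun s => pvSnipGetD s "langSlug" "" == lang)).isSome) with
    | none => true
    | some lang =>
        match snippets.find? (fun s => pvSnipGetD s "langSlug" "" == lang) with
        | none => true
        | some s0 => (s0.find? (fun p => p.1 == "code")).isSome)) = true)

instance (snippets : List (List (String × String))) (target_lang : Option String) : Decidable (Pre_find_relevant_code snippets target_lang) := by
  unfold Pre_find_relevant_code; infer_instance

def pvWitness_find_relevant_code : (List (List (String × String))) × Option String :=
  ([[("langSlug", "python3"), ("code", "print(1)")]], some "Python3")

def Spec_find_relevant_code (snippets : List (List (String × String))) (target_lang : Option String) (out : String) : Prop := out = find_relevant_code_alt snippets target_lang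
instance (snippets : List (List (String × String))) (target_lang : Option String) (out : String) : Decidable (Spec_find_relevant_code snippets target_lang out) := by unfold Spec_find_relevant_code; infer_instance

-- ===== CLAIM (what is proved, stated in full; the proofs are below) =====
def Claim_equal_find_relevant_code : Prop := ∀ (snippets : List (List (String × String))) (target_lang : Option String), Dom_find_relevant_code snippets target_lang → Pre_find_relevant_code snippets target_lang → Spec_find_relevant_code snippets target_lang (find_relevant_code snippets target_lang)


-- ===== LEMMAS AND PROOFS =====

-- the langSlug of a snippet, as an Option (proof-side view of the lookup)
def pvSlug? (s : List (String × String)) : Option String :=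
  (s.find? (fun p => p.1 == "langSlug")).map (·.2)

-- first-occurrence rank of a snippet's langSlug in the priority list (proof-side recursion)
def pvRk : List String → List (String × String) → Nat
  | [], _ => 0
  | L :: rest, s => if pvSlug? s == some L then 0 else pvRk rest s + 1

-- leftmost snippet of minimal rank, among snippets of rank strictly below the bound
def pvMinSel (P : List String) : List (List (String × String)) → Nat → Option (List (String × String))
  | [], _ => none
  | s :: t, r => if pvRk P s < r then some ((pvMinSel P t (pvRk P s)).getD s) else pvMinSel P t r

lemma pvRk_of_slug_none (P : List String) (s : List (String × String))
    (h : pvSlug? s = none) : pvRk P s = P.length := by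
  induction P with
  | nil => rfl
  | cons L rest ih => simp [pvRk, h, ih]

lemma pvRankB_eq_pvRk (P : List String) (s : List (String × String))
    (hP : ∀ L ∈ P, L ≠ "") : pvRankB P s = pvRk P s := by
  have hgd : pvSnipGetD s "langSlug" "" = (pvSlug? s).getD "" := rfl
  cases h : pvSlug? s with
  | none =>
    have hc : P.contains "" = false := by
      cases hcc : P.contains ""
      · rfl
      · exact absurd rfl (hP "" (List.contains_iff_mem.mp hcc))
    rw [pvRankB, hgd, h]
    simp only [Option.getD_none, hc, Bool.false_eq_true, if_false,
      pvRk_of_slug_none P s h]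
  | some v =>
    rw [pvRankB, hgd, h]
    simp only [Option.getD_some]
    clear hP hgd
    induction P with
    | nil => simp [pvRk]
    | cons L rest ih =>
      by_cases hv : v = L
      · subst hv
        rw [PySem.List.index?_cons_self]
        simp [pvRk, h]
      · have hne : L ≠ v := fun hh => hv hh.symm
        rw [PySem.List.index?_cons_of_ne rest hne]
        have hbeq : (pvSlug? s == some L) = false := by simp [h, hv]
        have hvL : (v == L) = false := by simp [hv]
        simp only [pvRk, hbeq, List.contains_cons, hvL, Bool.false_or,
          Bool.false_eq_true, if_false]
        by_cases hc : rest.contains v = true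
        · simp only [hc, if_true] at ih ⊢
          have hsome : (PySem.List.index? rest v).isSome := by
            rw [PySem.List.index?_isSome_iff]; exact List.contains_iff_mem.mp hc
          cases hi : PySem.List.index? rest v with
          | none => rw [hi] at hsome; simp at hsome
          | some k =>
            rw [hi] at ih
            simp only [Option.map_some, Option.getD_some] at ih ⊢
            omega
        · have hc' : rest.contains v = false := by
            cases hcc : rest.contains v
            · rfl
            · exact absurd hcc hc
          have hni : PySem.List.index? rest v = none := by
            rw [PySem.List.index?_eq_none_iff]
            intro hm
            rw [List.contains_iff_mem.mpr hm] at hc'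
            simp at hc'
          simp only [hc', Bool.false_eq_true, if_false, List.length_cons]
          simp only [hc', Bool.false_eq_true, if_false] at ih
          omega

lemma pvMinSel_zero (P : List String) (xs : List (List (String × String))) :
    pvMinSel P xs 0 = none := by
  induction xs with
  | nil => rfl
  | cons s t ih => simp [pvMinSel, ih]

-- the B loop returns the leftmost minimal-rank snippet below the running bound, else the
-- accumulator (the rank-0 early break changes nothing: rank 0 cannot be improved on)
lemma pvLoopB_eq_minSel (P : List String) (hP : ∀ L ∈ P, L ≠ "") :
    ∀ (xs : List (List (String × String))) (b : Option (List (String × String))) (r : Nat),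
      (pvLoopB P xs b r).1 = match pvMinSel P xs r with
                             | some u => some u
                             | none => b := by
  intro xs
  induction xs with
  | nil => intro b r; simp [pvLoopB, pvMinSel]
  | cons s t ih =>
    intro b r
    simp only [pvLoopB, pvRankB_eq_pvRk P s hP, pvMinSel]
    by_cases h : pvRk P s < r
    · simp only [h, if_true]
      by_cases h0 : pvRk P s = 0
      · simp [h0, pvMinSel_zero]
      · simp only [h0, if_false, ih]
        cases hm : pvMinSel P t (pvRk P s) <;> simp
    · simp only [h, if_false, ih]

-- A's inner-loop match test agrees with the Option-valued slug test when lang ≠ ""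
lemma pvMatch_eq (s : List (String × String)) (L : String) (hL : L ≠ "") :
    (pvSnipGetD s "langSlug" "" == L) = (pvSlug? s == some L) := by
  have : pvSnipGetD s "langSlug" "" = (pvSlug? s).getD "" := rfl
  rw [this]
  cases h : pvSlug? s with
  | none => simp [Option.getD, Ne.symm hL]
  | some v => simp

-- with a match of L present and a positive bound, pvMinSel over L::rest returns the first match
lemma pvMinSel_cons_match (L : String) (rest : List String) :
    ∀ (xs : List (List (String × String))) (w : List (String × String)) (r : Nat),
      1 ≤ r →
      xs.find? (fun s => pvSlug? s == some L) = some w →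
      pvMinSel (L :: rest) xs r = some w := by
  intro xs
  induction xs with
  | nil => intro w r _ h; simp at h
  | cons s t ih =>
    intro w r hr hf
    rw [List.find?_cons] at hf
    by_cases hs : (pvSlug? s == some L) = true
    · rw [hs] at hf
      simp only [Option.some.injEq] at hf
      subst hf
      have h0 : pvRk (L :: rest) s = 0 := by simp [pvRk, hs]
      simp [pvMinSel, h0, pvMinSel_zero, Nat.lt_of_lt_of_le Nat.zero_lt_one hr]
    · have hs' : (pvSlug? s == some L) = false := by
        cases hh : (pvSlug? s == some L)
        · rfl
        · exact absurd hh hs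
      rw [hs'] at hf
      have hrk : pvRk (L :: rest) s = pvRk rest s + 1 := by simp [pvRk, hs']
      simp only [pvMinSel, hrk]
      by_cases hlt : pvRk rest s + 1 < r
      · simp only [hlt, if_true]
        rw [ih w (pvRk rest s + 1) (Nat.le_add_left 1 _) hf]
        simp
      · simp only [hlt, if_false]
        exact ih w r hr hf

-- with no match of L, ranks over L::rest are a shift of ranks over rest
lemma pvMinSel_cons_nomatch (L : String) (rest : List String) :
    ∀ (xs : List (List (String × String))) (r : Nat),
      (∀ s ∈ xs, (pvSlug? s == some L) = false) →
      pvMinSel (L :: rest) xs (r + 1) = pvMinSel rest xs r := by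
  intro xs
  induction xs with
  | nil => intro r _; rfl
  | cons s t ih =>
    intro r hno
    have hs : (pvSlug? s == some L) = false := hno s (List.mem_cons_self)
    have hrk : pvRk (L :: rest) s = pvRk rest s + 1 := by simp [pvRk, hs]
    have ht : ∀ u ∈ t, (pvSlug? u == some L) = false :=
      fun u hu => hno u (List.mem_cons_of_mem s hu)
    simp only [pvMinSel, hrk]
    by_cases hlt : pvRk rest s < r
    · have hlt' : pvRk rest s + 1 < r + 1 := Nat.succ_lt_succ hlt
      simp only [hlt, hlt', if_true, ih (pvRk rest s) ht]
    · have hlt' : ¬ (pvRk rest s + 1 < r + 1) := fun h => hlt (Nat.lt_of_succ_lt_succ h)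
      simp only [hlt, hlt', if_false, ih r ht]

-- pvScanA in find? form
lemma pvScanA_eq_find (lang : String) :
    ∀ (snippets : List (List (String × String))),
      pvScanA snippets lang =
        (snippets.find? (fun s => pvSnipGetD s "langSlug" "" == lang)).map
          (fun s => pvSnipGetD s "code" "") := by
  intro snippets
  induction snippets with
  | nil => rfl
  | cons s rest ih =>
    simp only [pvScanA, List.find?]
    by_cases h : (pvSnipGetD s "langSlug" "" == lang) = true
    · simp [h]
    · simp only [Bool.not_eq_true] at h
      simp [h, ih]

-- A's nested loops compute the code of the leftmost minimal-rank snippet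
lemma pvLoopA_eq_minSel :
    ∀ (P : List String) (xs : List (List (String × String))),
      (∀ L ∈ P, L ≠ "") →
      pvLoopA P xs = match pvMinSel P xs P.length with
                     | some u => pvSnipGetD u "code" ""
                     | none => "" := by
  intro P
  induction P with
  | nil => intro xs _; simp [pvLoopA, pvMinSel_zero]
  | cons L rest ih =>
    intro xs hne
    have hL : L ≠ "" := hne L (List.mem_cons_self)
    have hpred : (fun s => pvSnipGetD s "langSlug" "" == L) =
        (fun s => pvSlug? s == some L) := by
      funext s; exact pvMatch_eq s L hL
    simp only [pvLoopA, pvScanA_eq_find, hpred]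
    cases hf : xs.find? (fun s => pvSlug? s == some L) with
    | some w =>
      rw [pvMinSel_cons_match L rest xs w (L :: rest).length
            (by simp [List.length_cons]) hf]
      simp
    | none =>
      have hno : ∀ s ∈ xs, (pvSlug? s == some L) = false := by
        intro s hs
        have := List.find?_eq_none.mp hf s hs
        cases hh : (pvSlug? s == some L)
        · rfl
        · exact absurd hh this
      have hlen : (L :: rest).length = rest.length + 1 := List.length_cons ..
      rw [hlen, pvMinSel_cons_nomatch L rest xs rest.length hno]
      simp only [Option.map_none]
      exact ih xs (fun M hM => hne M (List.mem_cons_of_mem L hM))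

-- every language in lang_priority is nonempty
lemma pvPriority_ne_empty (target_lang : Option String) :
    ∀ L ∈ pvPriority target_lang, L ≠ "" := by
  intro L hL
  cases target_lang with
  | none => simp [pvPriority] at hL; rcases hL with h | h | h <;> simp [h]
  | some t =>
    by_cases ht : t = ""
    · simp [pvPriority, ht] at hL; rcases hL with h | h | h <;> simp [h]
    · simp only [pvPriority, ht, if_false] at hL
      have hlow : PySem.Str.lower t ≠ "" := by
        intro h0
        have h1 : (PySem.Str.lower t).toList = PySem.Chars.lower t.toList :=
          PySem.Str.toList_lower t
        rw [h0] at h1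
        have h2 : t.toList.map PySem.Chars.lowerChar = [] := by
          simpa [PySem.Chars.lower] using h1.symm
        have h3 : t.toList = [] := List.map_eq_nil_iff.mp h2
        exact ht (by have := congrArg String.ofList h3; simpa using this)
      rw [PySem.List.insert_zero] at hL
      rcases List.mem_cons.mp hL with h | h
      · rw [h]; exact hlow
      · simp at h; rcases h with h | h | h <;> simp [h]

-- ===== VERDICT (by name: the statement is the Claim_ definition above) =====
theorem find_relevant_code_spec : Claim_equal_find_relevant_code := by
  intro snippets target_lang _ _
  unfold Spec_find_relevant_code find_relevant_code
  have halt : find_relevant_code_alt snippets target_lang =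
      match (pvLoopB (pvPriority target_lang) snippets none (pvPriority target_lang).length).1 with
      | some s => pvSnipGetD s "code" ""
      | none => "" := rfl
  rw [halt]
  rw [pvLoopA_eq_minSel (pvPriority target_lang) snippets (pvPriority_ne_empty target_lang)]
  rw [pvLoopB_eq_minSel (pvPriority target_lang) (pvPriority_ne_empty target_lang) snippets none (pvPriority target_lang).length]
  cases hm : pvMinSel (pvPriority target_lang) snippets (pvPriority target_lang).length <;> simp
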